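-- pv_equiv track=rewrite | github.com/IlTACK-OH/Practice_Coding_Test | 프로그래머스/lv0/120895. 인덱스 바꾸기/인덱스 바꾸기.py | solution
-- ===== SOURCE A (Python) =====
-- def solution(my_string, num1, num2):
--     answer =''
--     for index, string in enumerate(my_string):
--         if index == num1:
--             answer += my_string[num2]
--         elif index == num2:
--             answer += my_string[num1]
--         else:
--             answer += string
--     return answer
-- ===== SOURCE B (Python) =====
-- def solution(my_string, num1, num2):
--     lst = list(my_string)
--     if 0 <= num1 < len(lst) and 0 <= num2 < len(lst):
--         lst[num1], lst[num2] = lst[num2], lst[num1]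
--     return ''.join(lst)
-- ===== Notes on version B (the rewrite author's own statement) =====
-- stated objective: idiomatic
-- what changed: Replaces A's per-character scan with index-comparison branches and repeated string concatenation by the idiomatic list-convert / guarded tuple-swap / single join (two writes plus one join instead of n conditional string appends); Pre_ excludes exactly the inputs where A raises IndexError (one index hits the loop while the other is outside Python's index range).
-- intended difference: When exactly one index is in [0, len) and the other is negative in-range and the two referenced characters differ, A half-applies the swap via negative wraparound (it overwrites one position and never the other), while B leaves the string unchanged, consistent with A's own no-op on every other invalid-index combination; a one-sided overwrite is not a swap, so B's uniform no-op is the intended behaviour. — e.g. on solution("ab", 0, -1): A returns "bb", B returns "ab"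
import Mathlib
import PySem

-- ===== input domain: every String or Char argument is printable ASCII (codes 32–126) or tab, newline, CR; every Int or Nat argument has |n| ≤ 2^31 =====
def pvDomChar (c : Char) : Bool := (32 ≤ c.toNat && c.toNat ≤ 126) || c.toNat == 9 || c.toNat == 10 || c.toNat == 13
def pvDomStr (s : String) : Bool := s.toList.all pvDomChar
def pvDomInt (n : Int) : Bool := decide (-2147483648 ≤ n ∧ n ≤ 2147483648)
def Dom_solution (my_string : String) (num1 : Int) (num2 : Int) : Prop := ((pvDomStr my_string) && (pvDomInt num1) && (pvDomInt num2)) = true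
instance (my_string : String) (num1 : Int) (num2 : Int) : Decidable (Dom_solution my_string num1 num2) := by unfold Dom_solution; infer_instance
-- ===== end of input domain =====

-- B swaps by list-convert / tuple-swap / join (return value only; no argument is mutated);
-- equivalence is claimed outside D_solution, within Pre_solution (A raises IndexError elsewhere).

-- ===== PORT A =====
-- A scans enumerate(my_string) and rebuilds the string character by character.
-- '(… ).getD ' '' is a totality guard for Python's IndexError: inside Pre_solution the
-- branch only fires when the lookup is 'some'.
def solution (my_string : String) (num1 : Int) (num2 : Int) : String :=
  let cs := my_string.toList
  String.mk ((PySem.List.enumerate cs).foldl (fun ans p =>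
    if p.1 = num1 then ans ++ [(PySem.List.pyGet? cs num2).getD ' ']
    else if p.1 = num2 then ans ++ [(PySem.List.pyGet? cs num1).getD ' ']
    else ans ++ [p.2]) [])

-- ===== PORT B =====
-- list(my_string); guarded tuple swap (RHS reads first, then the two writes); ''.join.
def solution_alt (my_string : String) (num1 : Int) (num2 : Int) : String :=
  let lst := my_string.toList
  let n : Int := lst.length
  if 0 ≤ num1 ∧ num1 < n ∧ 0 ≤ num2 ∧ num2 < n then
    String.mk (PySem.List.pySetD
      (PySem.List.pySetD lst num1 ((PySem.List.pyGet? lst num2).getD ' '))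
      num2 ((PySem.List.pyGet? lst num1).getD ' '))
  else
    String.mk lst

-- ===== PRECONDITION & SPEC =====
-- Pre_ excludes exactly the inputs on which Python A raises IndexError: one index equals a
-- loop position while the other is outside Python's index range [-len, len).
def Pre_solution (my_string : String) (num1 : Int) (num2 : Int) : Prop :=
  ¬ ((0 ≤ num1 ∧ num1 < (my_string.toList.length : Int) ∧ ¬ PySem.Raise.InRange my_string.toList.length num2) ∨
     (0 ≤ num2 ∧ num2 < (my_string.toList.length : Int) ∧ num2 ≠ num1 ∧ ¬ PySem.Raise.InRange my_string.toList.length num1))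
instance (my_string : String) (num1 : Int) (num2 : Int) : Decidable (Pre_solution my_string num1 num2) := by unfold Pre_solution; infer_instance

def pvWitness_solution : String × Int × Int := ("ab", 0, 1)

-- When exactly one index is in [0, len) and the other is negative in-range and the two referenced
-- characters differ, A half-applies the swap via negative wraparound (overwrites one position,
-- never the other) while B leaves the string unchanged (A's own behaviour on every other
-- invalid-index combination); a one-sided overwrite is not a swap, so B's no-op is intended.
def D_solution (my_string : String) (num1 : Int) (num2 : Int) : Prop :=
  ((0 ≤ num1 ∧ num1 < (my_string.toList.length : Int) ∧ num2 < 0) ∨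
   (0 ≤ num2 ∧ num2 < (my_string.toList.length : Int) ∧ num1 < 0)) ∧
  PySem.List.pyGet? my_string.toList num1 ≠ PySem.List.pyGet? my_string.toList num2
instance (my_string : String) (num1 : Int) (num2 : Int) : Decidable (D_solution my_string num1 num2) := by unfold D_solution; infer_instance

def Spec_solution (my_string : String) (num1 : Int) (num2 : Int) (out : String) : Prop := ¬ D_solution my_string num1 num2 → out = solution_alt my_string num1 num2
instance (my_string : String) (num1 : Int) (num2 : Int) (out : String) : Decidable (Spec_solution my_string num1 num2 out) := by unfold Spec_solution; infer_instance

def pvDiffWitness_solution : String × Int × Int := ("ab", 0, -1)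
def pvDiffWitnessOut_solution : String × String := ("bb", "ab")

-- ===== CLAIM (what is proved, stated in full; the proofs are below) =====
def Claim_unchanged_solution : Prop := ∀ (my_string : String) (num1 : Int) (num2 : Int), Dom_solution my_string num1 num2 → Pre_solution my_string num1 num2 → Spec_solution my_string num1 num2 (solution my_string num1 num2)
def Claim_changed_solution : Prop := Dom_solution (pvDiffWitness_solution.1) (pvDiffWitness_solution.2.1) (pvDiffWitness_solution.2.2) ∧ Pre_solution (pvDiffWitness_solution.1) (pvDiffWitness_solution.2.1) (pvDiffWitness_solution.2.2) ∧ D_solution (pvDiffWitness_solution.1) (pvDiffWitness_solution.2.1) (pvDiffWitness_solution.2.2) ∧ solution (pvDiffWitness_solution.1) (pvDiffWitness_solution.2.1) (pvDiffWitness_solution.2.2) = pvDiffWitnessOut_solution.1 ∧ solution_alt (pvDiffWitness_solution.1) (pvDiffWitness_solution.2.1) (pvDiffWitness_solution.2.2) = pvDiffWitnessOut_solution.2 ∧ pvDiffWitnessOut_solution.1 ≠ pvDiffWitnessOut_solution.2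
def Claim_exact_solution : Prop := ∀ (my_string : String) (num1 : Int) (num2 : Int), Dom_solution my_string num1 num2 → Pre_solution my_string num1 num2 → D_solution my_string num1 num2 → solution my_string num1 num2 ≠ solution_alt my_string num1 num2

-- ===== LEMMAS AND PROOFS =====

-- A's accumulating fold is a map over the enumeration.
lemma solution_eq_map (my_string : String) (num1 num2 : Int) :
    solution my_string num1 num2 =
      String.mk ((PySem.List.enumerate my_string.toList).map (fun p =>
        if p.1 = num1 then (PySem.List.pyGet? my_string.toList num2).getD ' '
        else if p.1 = num2 then (PySem.List.pyGet? my_string.toList num1).getD ' '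
        else p.2)) := by
  unfold solution
  dsimp only
  congr 1
  have hf : (fun (ans : List Char) (p : Int × Char) =>
      if p.1 = num1 then ans ++ [(PySem.List.pyGet? my_string.toList num2).getD ' ']
      else if p.1 = num2 then ans ++ [(PySem.List.pyGet? my_string.toList num1).getD ' ']
      else ans ++ [p.2]) =
      (fun (acc : List Char) (p : Int × Char) => acc ++
        [if p.1 = num1 then (PySem.List.pyGet? my_string.toList num2).getD ' '
         else if p.1 = num2 then (PySem.List.pyGet? my_string.toList num1).getD ' '
         else p.2]) := by
    funext ans p
    split_ifs <;> rfl
  rw [hf, PySem.List.foldl_append_singleton_eq_map, List.nil_append]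

-- index equality transport for getElem
lemma getElem_idx_congr (cs : List Char) (i j : Nat) (h : i = j) (hi : i < cs.length) :
    cs[i] = cs[j]'(h ▸ hi) := by subst h; rfl

-- a Python-in-range index has a character
lemma pyGet?_exists_of_inRange (cs : List Char) (i : Int) (h : PySem.Raise.InRange cs.length i) :
    ∃ c, PySem.List.pyGet? cs i = some c := by
  cases hh : PySem.List.pyGet? cs i
  · exact absurd h ((PySem.List.pyGet?_eq_none_iff _ _).mp hh)
  · exact ⟨_, rfl⟩

lemma inRange_bounds (n : Nat) (i : Int) (h : PySem.Raise.InRange n i) : -(n : Int) ≤ i ∧ i < n := by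
  simpa [PySem.Raise.InRange] using h

-- the k-th character A produces
lemma A_list_getElem (cs : List Char) (num1 num2 : Int) (k : Nat) (hk : k < cs.length)
    (hk' : k < ((PySem.List.enumerate cs).map (fun p =>
        if p.1 = num1 then (PySem.List.pyGet? cs num2).getD ' '
        else if p.1 = num2 then (PySem.List.pyGet? cs num1).getD ' '
        else p.2)).length) :
    ((PySem.List.enumerate cs).map (fun p =>
        if p.1 = num1 then (PySem.List.pyGet? cs num2).getD ' '
        else if p.1 = num2 then (PySem.List.pyGet? cs num1).getD ' '
        else p.2))[k]'hk' =
      (if (k : Int) = num1 then (PySem.List.pyGet? cs num2).getD ' '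
       else if (k : Int) = num2 then (PySem.List.pyGet? cs num1).getD ' '
       else cs[k]) := by
  rw [List.getElem_map, PySem.List.getElem_enumerate]
  simp

-- ===== VERDICT (by name: the statement is the Claim_ definition above) =====
theorem solution_spec : Claim_unchanged_solution := by
  intro ms num1 num2 hdom hpre hnD
  rw [solution_eq_map]
  unfold solution_alt
  dsimp only
  by_cases hG : 0 ≤ num1 ∧ num1 < (ms.toList.length : Int) ∧ 0 ≤ num2 ∧ num2 < (ms.toList.length : Int)
  · rw [if_pos hG]
    obtain ⟨h10, h11, h20, h21⟩ := hG
    apply congrArg String.mk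
    rw [PySem.List.pySetD_of_nonneg _ _ h10, PySem.List.pySetD_of_nonneg _ _ h20]
    apply List.ext_getElem
    · simp [PySem.List.length_enumerate]
    · intro k hk1 hk2
      have hkcs : k < ms.toList.length := by
        simpa [PySem.List.length_enumerate] using hk1
      rw [A_list_getElem ms.toList num1 num2 k hkcs hk1]
      rw [List.getElem_set, List.getElem_set]
      have hv1 : (PySem.List.pyGet? ms.toList num1).getD ' ' = ms.toList[num1.toNat]'(by omega) := by
        rw [PySem.List.pyGet?_eq_some_getElem ms.toList h10 h11]; rfl
      have hv2 : (PySem.List.pyGet? ms.toList num2).getD ' ' = ms.toList[num2.toNat]'(by omega) := by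
        rw [PySem.List.pyGet?_eq_some_getElem ms.toList h20 h21]; rfl
      split_ifs with a b c d e f g <;>
        first
          | rfl
          | (exfalso; omega)
          | (rw [hv1, hv2]; exact getElem_idx_congr _ _ _ (by omega) _)
  · rw [if_neg hG]
    apply congrArg String.mk
    apply List.ext_getElem
    · simp [PySem.List.length_enumerate]
    · intro k hk1 hk2
      rw [A_list_getElem ms.toList num1 num2 k hk2 hk1]
      by_cases p1 : 0 ≤ num1 ∧ num1 < (ms.toList.length : Int)
      · have p2 : ¬(0 ≤ num2 ∧ num2 < (ms.toList.length : Int)) :=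
          fun h => hG ⟨p1.1, p1.2, h.1, h.2⟩
        have hin : PySem.Raise.InRange ms.toList.length num2 := by
          by_contra hni; exact hpre (Or.inl ⟨p1.1, p1.2, hni⟩)
        have hb := inRange_bounds _ _ hin
        have h2neg : num2 < 0 := by omega
        have heqget : PySem.List.pyGet? ms.toList num1 = PySem.List.pyGet? ms.toList num2 := by
          by_contra hne; exact hnD ⟨Or.inl ⟨p1.1, p1.2, h2neg⟩, hne⟩
        rw [← heqget, PySem.List.pyGet?_eq_some_getElem ms.toList p1.1 p1.2]
        simp only [Option.getD_some]
        split_ifs with a b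
        · exact getElem_idx_congr _ _ _ (by omega) _
        · exact absurd b (by omega)
        · rfl
      · by_cases p2 : 0 ≤ num2 ∧ num2 < (ms.toList.length : Int)
        · have hne21 : num2 ≠ num1 := fun e => p1 (e ▸ p2)
          have hin : PySem.Raise.InRange ms.toList.length num1 := by
            by_contra hni; exact hpre (Or.inr ⟨p2.1, p2.2, hne21, hni⟩)
          have hb := inRange_bounds _ _ hin
          have h1neg : num1 < 0 := by omega
          have heqget : PySem.List.pyGet? ms.toList num1 = PySem.List.pyGet? ms.toList num2 := by
            by_contra hne; exact hnD ⟨Or.inr ⟨p2.1, p2.2, h1neg⟩, hne⟩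
          rw [heqget, PySem.List.pyGet?_eq_some_getElem ms.toList p2.1 p2.2]
          simp only [Option.getD_some]
          split_ifs with a b
          · exact absurd a (by omega)
          · exact getElem_idx_congr _ _ _ (by omega) _
          · rfl
        · split_ifs with a b
          · exact absurd a (fun _ => p1 (by omega))
          · exact absurd b (fun _ => p2 (by omega))
          · rfl

theorem solution_changed : Claim_changed_solution := by
  unfold Claim_changed_solution; decide

theorem solution_tight : Claim_exact_solution := by
  intro ms num1 num2 hdom hpre hD heq
  rw [solution_eq_map] at heq
  unfold solution_alt at heq
  dsimp only at heq
  obtain ⟨hreg, hneq⟩ := hD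
  have hGfalse : ¬(0 ≤ num1 ∧ num1 < (ms.toList.length : Int) ∧ 0 ≤ num2 ∧ num2 < (ms.toList.length : Int)) := by
    rcases hreg with ⟨_, _, h⟩ | ⟨_, _, h⟩ <;> rintro ⟨a, b, c, d⟩ <;> omega
  rw [if_neg hGfalse] at heq
  have hlist := String.ofList_inj.mp heq
  rcases hreg with ⟨h10, h11, h2neg⟩ | ⟨h20, h21, h1neg⟩
  · have hin2 : PySem.Raise.InRange ms.toList.length num2 := by
      by_contra hni; exact hpre (Or.inl ⟨h10, h11, hni⟩)
    obtain ⟨c2, hc2⟩ := pyGet?_exists_of_inRange ms.toList num2 hin2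
    have hk : num1.toNat < ms.toList.length := by omega
    have hk' : num1.toNat < ((PySem.List.enumerate ms.toList).map (fun p =>
        if p.1 = num1 then (PySem.List.pyGet? ms.toList num2).getD ' '
        else if p.1 = num2 then (PySem.List.pyGet? ms.toList num1).getD ' '
        else p.2)).length := by
      simpa [PySem.List.length_enumerate] using hk
    have hAk := A_list_getElem ms.toList num1 num2 num1.toNat hk hk'
    rw [if_pos (by omega)] at hAk
    have hchar : ms.toList[num1.toNat] = c2 := by
      rw [← List.getElem_of_eq hlist hk', hAk, hc2]; rfl
    apply hneq
    rw [PySem.List.pyGet?_eq_some_getElem ms.toList h10 h11, hc2, hchar]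
  · have hne21 : num2 ≠ num1 := by omega
    have hin1 : PySem.Raise.InRange ms.toList.length num1 := by
      by_contra hni; exact hpre (Or.inr ⟨h20, h21, hne21, hni⟩)
    obtain ⟨c1, hc1⟩ := pyGet?_exists_of_inRange ms.toList num1 hin1
    have hk : num2.toNat < ms.toList.length := by omega
    have hk' : num2.toNat < ((PySem.List.enumerate ms.toList).map (fun p =>
        if p.1 = num1 then (PySem.List.pyGet? ms.toList num2).getD ' '
        else if p.1 = num2 then (PySem.List.pyGet? ms.toList num1).getD ' '
        else p.2)).length := by
      simpa [PySem.List.length_enumerate] using hk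
    have hAk := A_list_getElem ms.toList num1 num2 num2.toNat hk hk'
    rw [if_neg (by omega), if_pos (by omega)] at hAk
    have hchar : ms.toList[num2.toNat] = c1 := by
      rw [← List.getElem_of_eq hlist hk', hAk, hc1]; rfl
    apply hneq
    rw [PySem.List.pyGet?_eq_some_getElem ms.toList h20 h21, hc1, hchar]
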